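-- pv_equiv track=rewrite | github.com/yakimk/lib | src/pb_robustness_measures/sampling_robustness_measure/srm.py | multiply_polys_tree
-- ===== SOURCE A (Python) =====
-- def convolve_truncate(a, b, maxdeg):
--     """
--     Truncated convolution of lists a and b up to degree maxdeg inclusive.
--     """
--     n = maxdeg + 1
--     c = [0] * n
--     nz_a = [i for i, v in enumerate(a) if v != 0]
--     nz_b = [j for j, v in enumerate(b) if v != 0]
--     for i in nz_a:
--         ai = a[i]
--         bj_list = nz_b
--         for j in bj_list:
--             t = i + j
--             if t > maxdeg:
--                 break
--             c[t] += ai * b[j]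
--     return c
--
-- def multiply_polys_tree(polys, maxdeg):
--     """
--     Multiply list `polys` (each a list of ints) truncated to degree maxdeg.
--     Uses balanced pairwise multiplication to reduce work compared to sequential multiply.
--     Returns list length maxdeg+1.
--     """
--     if not polys:
--         return [1] + [0] * maxdeg
--     # copy (and ensure internal lengths at least maxdeg+1)
--     cur = [p[:maxdeg + 1] if len(p) > maxdeg + 1 else p[:] + [0] * (maxdeg + 1 - len(p)) for p in polys]
--     while len(cur) > 1:
--         nxt = []
--         it = iter(cur)
--         for a in it:
--             try:
--                 b = next(it)
--             except StopIteration: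
--                 nxt.append(a[:maxdeg + 1])
--             else:
--                 nxt.append(convolve_truncate(a, b, maxdeg))
--         cur = nxt
--     return cur[0][:maxdeg + 1]
-- ===== SOURCE B (Python) =====
-- def multiply_polys_tree(polys, maxdeg):
--     """
--     Multiply list `polys` (each a list of ints) truncated to degree maxdeg.
--     Sequential left fold; each step computes the coefficients of the product
--     directly, only up to the true degree bound capped at maxdeg, and the
--     result is zero-padded to length maxdeg+1 at the end.
--     """
--     if not polys:
--         return [1] + [0] * maxdeg
--     n = maxdeg + 1
--     acc = [1]
--     for p in polys:
--         m = min(n, len(acc) + len(p) - 1) if p else 0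
--         acc = [sum(acc[j] * p[t - j]
--                    for j in range(max(0, t - len(p) + 1), min(t + 1, len(acc))))
--                for t in range(m)]
--     return (acc + [0] * (n - len(acc)))[:max(n, 0)]
-- ===== Notes on version B (the rewrite author's own statement) =====
-- stated objective: simpler
-- what changed: Replaces the balanced pairwise tree of nonzero-index scatter/break convolutions by a sequential left fold that computes each product coefficient directly as a windowed sum acc[j]*p[t-j], only up to the true degree bound capped at maxdeg, zero-padding once at the end.
-- intended difference: For maxdeg <= -2 with exactly one polynomial longer than 2*(-maxdeg-1), A's negative-slice p[:maxdeg+1] (applied twice) leaves a nonempty prefix of the unmultiplied polynomial, while B returns the intended empty list of length maxdeg+1 <= 0 that every other branch of A also produces. — e.g. on multiply_polys_tree([[1, 2, 3]], -2): A returns [1], B returns []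
import Mathlib
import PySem

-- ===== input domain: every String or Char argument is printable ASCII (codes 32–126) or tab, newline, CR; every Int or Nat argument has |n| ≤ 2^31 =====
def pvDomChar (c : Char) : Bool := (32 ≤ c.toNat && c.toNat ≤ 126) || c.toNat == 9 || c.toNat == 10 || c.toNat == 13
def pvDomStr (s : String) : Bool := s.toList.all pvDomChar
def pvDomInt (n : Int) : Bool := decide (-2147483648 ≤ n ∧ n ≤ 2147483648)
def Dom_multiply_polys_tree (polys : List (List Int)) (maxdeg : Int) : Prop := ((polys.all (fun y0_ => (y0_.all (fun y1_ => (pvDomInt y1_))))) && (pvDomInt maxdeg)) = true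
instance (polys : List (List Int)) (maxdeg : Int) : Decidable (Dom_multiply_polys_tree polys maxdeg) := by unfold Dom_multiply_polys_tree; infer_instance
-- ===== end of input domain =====

-- B replaces A's balanced pairwise tree of sparse scatter/break convolutions by a sequential
-- left fold computing each truncated-product coefficient directly (objective: simpler).


-- ===== PORT A =====
-- inner loop of convolve_truncate: 'for j in nz_b: … if t > maxdeg: break; c[t] += ai*b[j]'
def pvInner (b : List Int) (maxdeg : Int) (ai : Int) (i : Int) : List Int → List Int → List Int
  | [], c => c
  | j :: rest, c =>
    if i + j > maxdeg then c
    else pvInner b maxdeg ai i rest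
      (PySem.List.pySetD c (i + j) (PySem.List.pyGetD c (i + j) 0 + ai * PySem.List.pyGetD b j 0))

def pvConvolve (a b : List Int) (maxdeg : Int) : List Int :=
  -- c = [0]*n ; toNat clamps exactly like Python's list-repeat for n ≤ 0
  let c := List.replicate (maxdeg + 1).toNat (0 : Int)
  let nza := ((PySem.List.enumerate a 0).filter (fun iv => iv.2 != 0)).map (·.1)
  let nzb := ((PySem.List.enumerate b 0).filter (fun jv => jv.2 != 0)).map (·.1)
  nza.foldl (fun c i => pvInner b maxdeg (PySem.List.pyGetD a i 0) i nzb c) c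

-- one pass of the while-loop: pair consecutive elements, odd leftover gets a[:maxdeg+1]
def pvPairUp (maxdeg : Int) : List (List Int) → List (List Int)
  | [] => []
  | [a] => [PySem.List.slice a none (some (maxdeg + 1))]
  | a :: b :: rest => pvConvolve a b maxdeg :: pvPairUp maxdeg rest

-- 'while len(cur) > 1': each pass at least halves the length, so cur.length steps of fuel
-- suffice; the fuel only makes the same loop total.
def pvLoop (maxdeg : Int) : Nat → List (List Int) → List (List Int)
  | 0, cur => cur
  | fuel + 1, cur => if cur.length > 1 then pvLoop maxdeg fuel (pvPairUp maxdeg cur) else cur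

-- body of the initial copy/pad comprehension
def pvPad (maxdeg : Int) (p : List Int) : List Int :=
  if (p.length : Int) > maxdeg + 1 then PySem.List.slice p none (some (maxdeg + 1))
  else p ++ List.replicate (maxdeg + 1 - (p.length : Int)).toNat 0

def multiply_polys_tree (polys : List (List Int)) (maxdeg : Int) : List Int :=
  if polys = [] then 1 :: List.replicate maxdeg.toNat 0
  else
    let cur := polys.map (pvPad maxdeg)
    -- cur is provably nonempty here, so cur[0] = cur.getD 0 [] exactly
    PySem.List.slice ((pvLoop maxdeg cur.length cur).getD 0 []) none (some (maxdeg + 1))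

-- ===== PORT B =====
-- m = min(n, len(acc) + len(p) - 1) if p else 0
def pvM (acc p : List Int) (maxdeg : Int) : Int :=
  if p = [] then 0 else min (maxdeg + 1) ((acc.length : Int) + (p.length : Int) - 1)

-- acc = [sum(acc[j]*p[t-j] for j in range(max(0,t-len(p)+1), min(t+1,len(acc)))) for t in range(m)]
def pvAltStep (acc p : List Int) (maxdeg : Int) : List Int :=
  (PySem.List.pyRange 0 (pvM acc p maxdeg) 1).map (fun t =>
    ((PySem.List.pyRange (max 0 (t - (p.length : Int) + 1)) (min (t + 1) (acc.length : Int)) 1).map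
      (fun j => PySem.List.pyGetD acc j 0 * PySem.List.pyGetD p (t - j) 0)).sum)

def multiply_polys_tree_alt (polys : List (List Int)) (maxdeg : Int) : List Int :=
  if polys = [] then 1 :: List.replicate maxdeg.toNat 0
  else
    let acc := polys.foldl (fun acc p => pvAltStep acc p maxdeg) [1]
    -- (acc + [0] * (n - len(acc)))[:max(n, 0)]
    PySem.List.slice (acc ++ List.replicate (maxdeg + 1 - (acc.length : Int)).toNat 0)
      none (some (max (maxdeg + 1) 0))

-- ===== PRECONDITION & SPEC =====
-- For maxdeg ≤ -2 and exactly one polynomial longer than 2*(-maxdeg-1), A's negative slice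
-- p[:maxdeg+1] (applied twice) returns a nonempty prefix of the unmultiplied polynomial,
-- while B returns the intended empty list of length maxdeg+1 ≤ 0 that every other branch
-- of A also produces.
def D_multiply_polys_tree (polys : List (List Int)) (maxdeg : Int) : Prop :=
  maxdeg ≤ -2 ∧ polys.length = 1 ∧ 2 * (-maxdeg - 1) < ((polys.getD 0 []).length : Int)
instance (polys : List (List Int)) (maxdeg : Int) : Decidable (D_multiply_polys_tree polys maxdeg) := by
  unfold D_multiply_polys_tree; infer_instance

def Spec_multiply_polys_tree (polys : List (List Int)) (maxdeg : Int) (out : List Int) : Prop :=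
  ¬ D_multiply_polys_tree polys maxdeg → out = multiply_polys_tree_alt polys maxdeg
instance (polys : List (List Int)) (maxdeg : Int) (out : List Int) : Decidable (Spec_multiply_polys_tree polys maxdeg out) := by
  unfold Spec_multiply_polys_tree; infer_instance

def pvDiffWitness_multiply_polys_tree : List (List Int) × Int := ([[1, 2, 3]], -2)
def pvDiffWitnessOut_multiply_polys_tree : (List Int) × (List Int) := ([1], [])

-- ===== CLAIM (what is proved, stated in full; the proofs are below) =====
def Claim_unchanged_multiply_polys_tree : Prop := ∀ (polys : List (List Int)) (maxdeg : Int), Dom_multiply_polys_tree polys maxdeg → Spec_multiply_polys_tree polys maxdeg (multiply_polys_tree polys maxdeg)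
def Claim_changed_multiply_polys_tree : Prop := Dom_multiply_polys_tree (pvDiffWitness_multiply_polys_tree.1) (pvDiffWitness_multiply_polys_tree.2) ∧ D_multiply_polys_tree (pvDiffWitness_multiply_polys_tree.1) (pvDiffWitness_multiply_polys_tree.2) ∧ multiply_polys_tree (pvDiffWitness_multiply_polys_tree.1) (pvDiffWitness_multiply_polys_tree.2) = pvDiffWitnessOut_multiply_polys_tree.1 ∧ multiply_polys_tree_alt (pvDiffWitness_multiply_polys_tree.1) (pvDiffWitness_multiply_polys_tree.2) = pvDiffWitnessOut_multiply_polys_tree.2 ∧ pvDiffWitnessOut_multiply_polys_tree.1 ≠ pvDiffWitnessOut_multiply_polys_tree.2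
def Claim_exact_multiply_polys_tree : Prop := ∀ (polys : List (List Int)) (maxdeg : Int), Dom_multiply_polys_tree polys maxdeg → D_multiply_polys_tree polys maxdeg → multiply_polys_tree polys maxdeg ≠ multiply_polys_tree_alt polys maxdeg

-- ===== LEMMAS AND PROOFS =====

-- coefficient semantics: a list denotes the power series with those coefficients
def pvCo (l : List Int) (t : Nat) : Int := l.getD t 0
noncomputable def pvF (l : List Int) : PowerSeries ℤ := PowerSeries.mk fun t => pvCo l t
noncomputable def pvProdF (cur : List (List Int)) : PowerSeries ℤ := (cur.map pvF).prod
def pvTrunc (n : Nat) (f : Nat → Int) : List Int := (List.range n).map f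

lemma pvCoeff_F (l : List Int) (t : Nat) : PowerSeries.coeff t (pvF l) = pvCo l t := by
  simp [pvF]

lemma pvTrunc_length (n : Nat) (f : Nat → Int) : (pvTrunc n f).length = n := by simp [pvTrunc]

lemma pvCo_trunc (n : Nat) (f : Nat → Int) {t : Nat} (h : t < n) : pvCo (pvTrunc n f) t = f t := by
  simp [pvCo, pvTrunc, List.getD_eq_getElem?_getD, List.getElem?_range h]

lemma pvEq_trunc {l : List Int} {n : Nat} {f : Nat → Int} (h1 : l.length = n)
    (h2 : ∀ t < n, pvCo l t = f t) : l = pvTrunc n f := by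
  apply List.ext_getElem (by simp [pvTrunc, h1])
  intro i hi1 hi2
  have := h2 i (by omega)
  rw [pvCo, List.getD_eq_getElem _ _ hi1] at this
  simpa [pvTrunc] using this

lemma pvCo_eq_zero_of_le {l : List Int} {t : Nat} (h : l.length ≤ t) : pvCo l t = 0 :=
  List.getD_eq_default l 0 h

lemma pvCoeff_mul_range (φ ψ : PowerSeries ℤ) (t : Nat) :
    PowerSeries.coeff t (φ * ψ) = ∑ j ∈ Finset.range (t + 1), PowerSeries.coeff j φ * PowerSeries.coeff (t - j) ψ := by
  rw [PowerSeries.coeff_mul, Finset.Nat.sum_antidiagonal_eq_sum_range_succ_mk]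

lemma pvEqn_mul {n : Nat} {φ φ' ψ ψ' : PowerSeries ℤ}
    (h1 : ∀ t < n, PowerSeries.coeff t φ = PowerSeries.coeff t φ')
    (h2 : ∀ t < n, PowerSeries.coeff t ψ = PowerSeries.coeff t ψ') :
    ∀ t < n, PowerSeries.coeff t (φ * ψ) = PowerSeries.coeff t (φ' * ψ') := by
  intro t ht
  rw [PowerSeries.coeff_mul, PowerSeries.coeff_mul]
  refine Finset.sum_congr rfl ?_
  intro p hp
  rw [Finset.mem_antidiagonal] at hp
  rw [h1 p.1 (by omega), h2 p.2 (by omega)]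

lemma pvEqn_prod_map {n : Nat} (F G : List Int → PowerSeries ℤ) :
    ∀ (ps : List (List Int)), (∀ p ∈ ps, ∀ t < n, PowerSeries.coeff t (F p) = PowerSeries.coeff t (G p)) →
    ∀ t < n, PowerSeries.coeff t ((ps.map F).prod) = PowerSeries.coeff t ((ps.map G).prod) := by
  intro ps
  induction ps with
  | nil => intro _ t ht; simp
  | cons p ps ih =>
    intro h t ht
    simp only [List.map_cons, List.prod_cons]
    exact pvEqn_mul (h p (by simp)) (ih (fun q hq => h q (by simp [hq]))) t ht

-- list-sum ↔ Finset-sum bridges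
lemma pvSum_filter_range (q : Nat → Bool) (f : Nat → Int) (n : Nat) :
    (((List.range n).filter q).map f).sum = ∑ j ∈ Finset.range n, if q j then f j else 0 := by
  induction n with
  | zero => simp
  | succ m ih =>
    rw [List.range_succ, List.filter_append, Finset.sum_range_succ, ← ih]
    cases hq : q m <;> simp [hq]

-- ========== A side ==========

-- the nonzero-index lists
def pvNz (l : List Int) : List Nat := (List.range l.length).filter (fun j => l.getD j 0 != 0)
def pvNzI (l : List Int) : List Int := List.map (fun j : Nat => (j : Int)) (pvNz l)

lemma pvNz_eq (l : List Int) :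
    ((PySem.List.enumerate l 0).filter (fun iv => iv.2 != 0)).map (·.1)
      = pvNzI l := by
  rw [PySem.List.enumerate_eq_map_pyRange l 0, PySem.List.len_eq, PySem.List.pyRange_zero_natCast]
  simp only [List.filter_map, List.map_map, Function.comp_def, PySem.List.pyGetD_natCast]
  simp [pvNzI, pvNz, List.getD_eq_getElem?_getD]

lemma pvNz_pairwise (l : List Int) : (pvNzI l).Pairwise (· ≤ ·) := by
  have h0 : (pvNz l).Pairwise (· < ·) := List.Pairwise.filter _ List.pairwise_lt_range
  have := List.Pairwise.map (R := fun (a b : Nat) => a < b) (S := fun (a b : Int) => a ≤ b)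
    (l := pvNz l) (fun j : Nat => (j : Int))
    (fun a b h => by show ((a : Int) ≤ (b : Int)); exact_mod_cast Nat.le_of_lt h) h0
  exact this

lemma pvNz_nodup (l : List Int) : (pvNz l).Nodup := (List.nodup_range).filter _

lemma pvMem_nz {l : List Int} {j : Nat} : j ∈ pvNz l ↔ j < l.length ∧ l.getD j 0 ≠ 0 := by
  simp [pvNz, List.mem_filter, List.mem_range]

-- break elimination for the inner loop
lemma pvInner_eq (b : List Int) (maxdeg ai i : Int) :
    ∀ (l : List Int) (c : List Int), l.Pairwise (· ≤ ·) →
      pvInner b maxdeg ai i l c =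
        (l.filter (fun j => decide (i + j ≤ maxdeg))).foldl
          (fun c j => PySem.List.pySetD c (i + j) (PySem.List.pyGetD c (i + j) 0 + ai * PySem.List.pyGetD b j 0)) c := by
  intro l
  induction l with
  | nil => intro c _; simp [pvInner]
  | cons j rest ih =>
    intro c hpw
    rw [List.pairwise_cons] at hpw
    rw [pvInner, List.filter_cons]
    by_cases h : i + j > maxdeg
    · simp only [if_pos h]
      have hrest : rest.filter (fun x => decide (i + x ≤ maxdeg)) = [] := by
        rw [List.filter_eq_nil_iff]
        intro x hx
        have := hpw.1 x hx
        simp only [decide_eq_true_eq]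
        omega
      have : (decide (i + j ≤ maxdeg)) = false := by simp; omega
      simp [this, hrest]
    · simp only [if_neg h]
      have : (decide (i + j ≤ maxdeg)) = true := by simp; omega
      simp only [this, if_pos]
      rw [List.foldl_cons]
      exact ih _ hpw.2

-- generic "apply a batch of position/increment updates"
def pvApply (c : List Int) (us : List (Int × Int)) : List Int :=
  us.foldl (fun c u => PySem.List.pySetD c u.1 (PySem.List.pyGetD c u.1 0 + u.2)) c

lemma pvApply_length (us : List (Int × Int)) : ∀ c, (pvApply c us).length = c.length := by
  induction us with
  | nil => intro c; rfl
  | cons u rest ih =>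
    intro c
    rw [pvApply, List.foldl_cons, ← pvApply, ih]
    exact PySem.List.length_pySetD ..

lemma pvApply_getD (t : Nat) :
    ∀ (us : List (Int × Int)) (c : List Int), (∀ u ∈ us, 0 ≤ u.1 ∧ u.1 < (c.length : Int)) →
      pvCo (pvApply c us) t = pvCo c t + ((us.filter (fun u => u.1 = (t : Int))).map (·.2)).sum := by
  intro us
  induction us with
  | nil => intro c _; simp [pvApply, pvCo]
  | cons u rest ih =>
    intro c hus
    have hu := hus u (by simp)
    rw [pvApply, List.foldl_cons, ← pvApply]
    have hlen : (PySem.List.pySetD c u.1 (PySem.List.pyGetD c u.1 0 + u.2)).length = c.length :=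
      PySem.List.length_pySetD ..
    rw [ih _ (fun v hv => by rw [hlen]; exact hus v (by simp [hv]))]
    rw [List.filter_cons]
    obtain ⟨m, hm⟩ : ∃ m : Nat, u.1 = (m : Int) := ⟨u.1.toNat, (Int.toNat_of_nonneg hu.1).symm⟩
    have hmlen : m < c.length := by exact_mod_cast hm ▸ hu.2
    rw [hm, PySem.List.pySetD_natCast, PySem.List.pyGetD_natCast]
    have hco : ∀ s : Nat, pvCo (c.set m (c.getD m 0 + u.2)) s
        = if m = s then c.getD m 0 + u.2 else pvCo c s := by
      intro s
      simp only [pvCo, List.getD_eq_getElem?_getD, List.getElem?_set, hmlen]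
      by_cases hms : m = s <;> simp [hms]
    by_cases hmt : m = t
    · have : (decide (((m : Nat) : Int) = (t : Int))) = true := by simp [hmt]
      simp only [this, if_pos, List.map_cons, List.sum_cons]
      rw [hco t, if_pos hmt]
      subst hmt
      simp only [pvCo, List.getD_eq_getElem?_getD]
      ring
    · have : (decide (((m : Nat) : Int) = (t : Int))) = false := by simp [hmt]
      simp only [List.getD_eq_getElem?_getD] at hco
      simp [hco t, hmt]

lemma pvSum_flatMap (f : Int → List Int) : ∀ (l : List Int), (l.flatMap f).sum = (l.map (fun x => (f x).sum)).sum := by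
  intro l
  induction l with
  | nil => simp
  | cons x xs ih => simp [ih]

-- the batch of updates produced by one outer-loop iteration
def pvUpd (a b : List Int) (maxdeg : Int) (i : Int) : List (Int × Int) :=
  ((pvNzI b).filter (fun j => decide (i + j ≤ maxdeg))).map
    (fun j => (i + j, PySem.List.pyGetD a i 0 * PySem.List.pyGetD b j 0))

lemma pvInner_apply (a b : List Int) (maxdeg : Int) (i : Int) (c : List Int) :
    pvInner b maxdeg (PySem.List.pyGetD a i 0) i (pvNzI b) c = pvApply c (pvUpd a b maxdeg i) := by
  rw [pvInner_eq b maxdeg _ i (pvNzI b) c (pvNz_pairwise b), pvUpd, pvApply, List.foldl_map]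

lemma pvApply_append (c : List Int) (us vs : List (Int × Int)) :
    pvApply c (us ++ vs) = pvApply (pvApply c us) vs := by
  rw [pvApply, pvApply, pvApply, List.foldl_append]

lemma pvFold_apply (us : Int → List (Int × Int)) :
    ∀ (lst : List Int) (c : List Int),
      lst.foldl (fun c i => pvApply c (us i)) c = pvApply c (lst.flatMap us) := by
  intro lst
  induction lst with
  | nil => intro c; simp [pvApply]
  | cons x xs ih =>
    intro c
    rw [List.foldl_cons, List.flatMap_cons, pvApply_append]
    exact ih (pvApply c (us x))

lemma pvConvolve_eq_apply (a b : List Int) (maxdeg : Int) :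
    pvConvolve a b maxdeg
      = pvApply (List.replicate (maxdeg + 1).toNat 0) ((pvNzI a).flatMap (pvUpd a b maxdeg)) := by
  rw [pvConvolve]
  simp only [pvNz_eq, pvInner_apply]
  exact pvFold_apply _ _ _

lemma pvConvolve_length (a b : List Int) (maxdeg : Int) :
    (pvConvolve a b maxdeg).length = (maxdeg + 1).toNat := by
  rw [pvConvolve_eq_apply, pvApply_length, List.length_replicate]

lemma pvMem_nzI {l : List Int} {i : Int} : i ∈ pvNzI l → ∃ iN : Nat, i = (iN : Int) ∧ iN ∈ pvNz l := by
  intro h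
  rcases List.mem_map.mp h with ⟨iN, hmem, rfl⟩
  exact ⟨iN, rfl, hmem⟩

lemma pvUpd_sum (a b : List Int) (maxdeg : Int) (t iN : Nat) (hmd : (t : Int) ≤ maxdeg) :
    ((( pvUpd a b maxdeg (iN : Int)).filter (fun u => decide (u.1 = (t : Int)))).map (fun u => u.2)).sum
      = if iN ≤ t ∧ (t - iN) ∈ pvNz b then pvCo a iN * pvCo b (t - iN) else 0 := by
  rw [pvUpd, pvNzI]
  simp only [List.filter_map, List.map_map, List.filter_filter, Function.comp_def]
  by_cases hit : iN ≤ t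
  · have hP : ∀ jN ∈ pvNz b,
        (decide (((iN : Int) + (jN : Int)) = (t : Int)) && decide ((iN : Int) + (jN : Int) ≤ maxdeg))
          = (jN == t - iN) := by
      intro jN _
      by_cases h : jN = t - iN
      · subst h
        have h1 : ((iN : Int) + ((t - iN : Nat) : Int)) = (t : Int) := by omega
        simp [h1, hmd]
      · have hb : (jN == t - iN) = false := beq_eq_false_iff_ne.mpr h
        rw [hb, Bool.and_eq_false_iff]
        left; simp; omega
    rw [List.filter_congr hP, List.filter_beq]
    by_cases hmem : (t - iN) ∈ pvNz b
    · rw [List.count_eq_one_of_mem (pvNz_nodup b) hmem]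
      simp [pvCo, hit, hmem]
    · rw [List.count_eq_zero_of_not_mem hmem]
      simp [hmem]
  · have hP : ∀ jN ∈ pvNz b,
        (decide (((iN : Int) + (jN : Int)) = (t : Int)) && decide ((iN : Int) + (jN : Int) ≤ maxdeg))
          = false := by
      intro jN _
      simp
      omega
    rw [List.filter_congr hP]
    simp [hit]

lemma pvConvolve_co (a b : List Int) (maxdeg : Int) (t : Nat) (ht : t < (maxdeg + 1).toNat) :
    pvCo (pvConvolve a b maxdeg) t = ∑ j ∈ Finset.range (t + 1), pvCo a j * pvCo b (t - j) := by
  have hmd : (t : Int) ≤ maxdeg := by omega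
  have hm0 : 0 ≤ maxdeg := by omega
  rw [pvConvolve_eq_apply]
  rw [pvApply_getD t _ _ ?hbound]
  case hbound =>
    intro u hu
    rcases List.mem_flatMap.mp hu with ⟨i, hi, hui⟩
    rcases pvMem_nzI hi with ⟨iN, rfl, _⟩
    rcases List.mem_map.mp hui with ⟨j, hj, rfl⟩
    have hjle : ((iN : Int) + j ≤ maxdeg) := by
      have := (List.mem_filter.mp hj).2; simpa using this
    rcases pvMem_nzI (List.mem_filter.mp hj).1 with ⟨jN, rfl, _⟩
    constructor
    · simp; omega
    · simp [List.length_replicate]; omega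
  have hzero : pvCo (List.replicate (maxdeg + 1).toNat (0 : Int)) t = 0 := by
    simp [pvCo]
  rw [hzero, List.filter_flatMap, List.map_flatMap, pvSum_flatMap, pvNzI, List.map_map]
  have hper : ∀ iN ∈ pvNz a,
      ((fun i => (List.map (fun u => u.2) ((pvUpd a b maxdeg i).filter (fun u => decide (u.1 = (t : Int))))).sum)
          ∘ fun j : Nat => (j : Int)) iN
        = (if iN ≤ t ∧ (t - iN) ∈ pvNz b then pvCo a iN * pvCo b (t - iN) else 0) := by
    intro iN _
    exact pvUpd_sum a b maxdeg t iN hmd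
  rw [List.map_congr_left hper, zero_add]
  have hsum := pvSum_filter_range (fun j => a.getD j 0 != 0)
      (fun i => if i ≤ t ∧ (t - i) ∈ pvNz b then pvCo a i * pvCo b (t - i) else 0) a.length
  rw [show pvNz a = (List.range a.length).filter (fun j => a.getD j 0 != 0) from rfl, hsum]
  have h2 : ∀ i : Nat, (if (a.getD i 0 != 0) then (if i ≤ t ∧ (t - i) ∈ pvNz b then pvCo a i * pvCo b (t - i) else 0) else 0)
      = (if i ≤ t then pvCo a i * pvCo b (t - i) else 0) := by
    intro i
    by_cases hq : a.getD i 0 = 0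
    · have hco : pvCo a i = 0 := hq
      simp [hco]
    · by_cases hit : i ≤ t
      · by_cases hmem : (t - i) ∈ pvNz b
        · have hq2 : ¬ a[i]?.getD 0 = 0 := by rw [← List.getD_eq_getElem?_getD]; exact hq
          simp [hq2, hit, hmem]
        · have hb : pvCo b (t - i) = 0 := by
            rcases not_and_or.mp (fun hc => hmem (pvMem_nz.mpr ⟨hc.1, hc.2⟩)) with h | h
            · exact pvCo_eq_zero_of_le (by omega)
            · exact not_not.mp h
          simp [hb]
      · simp [hit]
  have e1 : ∑ i ∈ Finset.range a.length, (if i ≤ t then pvCo a i * pvCo b (t - i) else 0)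
      = ∑ i ∈ Finset.range (max a.length (t + 1)), (if i ≤ t then pvCo a i * pvCo b (t - i) else 0) :=
    Finset.sum_subset (Finset.range_subset.mpr (fun x hx => Finset.mem_range.mpr (by omega)))
      (fun x _ hxn => by
        have hx : a.length ≤ x := by
          rcases Nat.lt_or_ge x a.length with h | h
          · exact absurd (Finset.mem_range.mpr h) hxn
          · exact h
        have hco : pvCo a x = 0 := pvCo_eq_zero_of_le hx
        simp [hco])
  have e2 : ∑ i ∈ Finset.range (t + 1), (if i ≤ t then pvCo a i * pvCo b (t - i) else 0)
      = ∑ i ∈ Finset.range (max a.length (t + 1)), (if i ≤ t then pvCo a i * pvCo b (t - i) else 0) :=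
    Finset.sum_subset (Finset.range_subset.mpr (fun x hx => Finset.mem_range.mpr (by omega)))
      (fun x _ hxn => by
        have hx : t + 1 ≤ x := by
          rcases Nat.lt_or_ge x (t + 1) with h | h
          · exact absurd (Finset.mem_range.mpr h) hxn
          · exact h
        rw [if_neg (by omega)])
  rw [Finset.sum_congr rfl (fun i _ => h2 i), e1, ← e2]
  exact Finset.sum_congr rfl (fun i hi => by
    rw [if_pos (Nat.lt_succ_iff.mp (Finset.mem_range.mp hi))])

lemma pvConvolve_spec (a b : List Int) (maxdeg : Int) :
    pvConvolve a b maxdeg = pvTrunc (maxdeg + 1).toNat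
      (fun t => PowerSeries.coeff t (pvF a * pvF b)) := by
  refine pvEq_trunc (pvConvolve_length a b maxdeg) ?_
  intro t ht
  rw [pvConvolve_co a b maxdeg t ht, pvCoeff_mul_range]
  simp [pvCoeff_F]

-- ========== B side ==========

lemma pvSum_range (f : Nat → Int) (n : Nat) :
    ((List.range n).map f).sum = ∑ j ∈ Finset.range n, f j := by
  induction n with
  | zero => simp
  | succ m ih => simp [List.range_succ, Finset.sum_range_succ, ih]

lemma pvGetD_zero_of_ge (xs : List Int) (j : Int) (h : (xs.length : Int) ≤ j) :
    PySem.List.pyGetD xs j 0 = 0 := by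
  rw [show j = ((j.toNat : Nat) : Int) from by omega, PySem.List.pyGetD_natCast]
  exact List.getD_eq_default _ _ (by omega)

lemma pvCell (acc p : List Int) (t : Nat) :
    ((PySem.List.pyRange (max 0 ((t : Int) - (p.length : Int) + 1))
        (min ((t : Int) + 1) (acc.length : Int)) 1).map
      (fun j => PySem.List.pyGetD acc j 0 * PySem.List.pyGetD p ((t : Int) - j) 0)).sum
      = ∑ j ∈ Finset.range (t + 1), pvCo acc j * pvCo p (t - j) := by
  set a0 := max 0 ((t : Int) - (p.length : Int) + 1) with ha0
  set b0 := min ((t : Int) + 1) (acc.length : Int) with hb0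
  set f : Int → Int := fun j => PySem.List.pyGetD acc j 0 * PySem.List.pyGetD p ((t : Int) - j) 0 with hf
  have hzero : ∀ j : Int, 0 ≤ j → j < (t : Int) + 1 → (j < a0 ∨ b0 ≤ j) → f j = 0 := by
    intro j h0 hlt hcase
    rcases hcase with h | h
    · have ha : (p.length : Int) ≤ (t : Int) - j := by omega
      rw [hf]
      simp [pvGetD_zero_of_ge p ((t : Int) - j) ha]
    · have ha : (acc.length : Int) ≤ j := by omega
      rw [hf]
      simp [pvGetD_zero_of_ge acc j ha]
  have hfull : ((PySem.List.pyRange 0 ((t : Int) + 1) 1).map f).sum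
      = ∑ j ∈ Finset.range (t + 1), pvCo acc j * pvCo p (t - j) := by
    rw [show ((t : Int) + 1) = (((t + 1 : Nat) : Nat) : Int) from by push_cast; ring,
      PySem.List.pyRange_zero_natCast, List.map_map, pvSum_range]
    apply Finset.sum_congr rfl
    intro j hj
    have hjt : j ≤ t := Nat.lt_succ_iff.mp (Finset.mem_range.mp hj)
    show f (j : Int) = _
    rw [hf]
    show PySem.List.pyGetD acc (j : Int) 0 * PySem.List.pyGetD p ((t : Int) - (j : Int)) 0 = _
    rw [show ((t : Int) - (j : Int)) = ((t - j : Nat) : Int) from by omega,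
      PySem.List.pyGetD_natCast, PySem.List.pyGetD_natCast]
    rfl
  by_cases hord : a0 < b0
  · have h0a : (0 : Int) ≤ a0 := le_max_left 0 _
    have hbt : b0 ≤ (t : Int) + 1 := min_le_left _ _
    rw [← hfull, PySem.List.pyRange_one_append 0 a0 ((t : Int) + 1) h0a (by omega),
      PySem.List.pyRange_one_append a0 b0 ((t : Int) + 1) (by omega) hbt,
      List.map_append, List.map_append, List.sum_append, List.sum_append]
    have h1 : ((PySem.List.pyRange 0 a0 1).map f).sum = 0 := by
      apply List.sum_eq_zero
      intro x hx
      rcases List.mem_map.mp hx with ⟨j, hj, rfl⟩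
      have hm := PySem.List.mem_pyRange_one.mp hj
      exact hzero j (by omega) (by omega) (Or.inl (by omega))
    have h3 : ((PySem.List.pyRange b0 ((t : Int) + 1) 1).map f).sum = 0 := by
      apply List.sum_eq_zero
      intro x hx
      rcases List.mem_map.mp hx with ⟨j, hj, rfl⟩
      have hm := PySem.List.mem_pyRange_one.mp hj
      exact hzero j (by omega) (by omega) (Or.inr (by omega))
    rw [h1, h3]
    ring
  · rw [PySem.List.pyRange_one_eq_nil (by omega)]
    have hall : ((PySem.List.pyRange 0 ((t : Int) + 1) 1).map f).sum = 0 := by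
      apply List.sum_eq_zero
      intro x hx
      rcases List.mem_map.mp hx with ⟨j, hj, rfl⟩
      have hm := PySem.List.mem_pyRange_one.mp hj
      exact hzero j (by omega) (by omega) (by omega)
    simp only [List.map_nil, List.sum_nil]
    rw [← hfull, hall]

lemma pvAltStep_spec (acc p : List Int) (maxdeg : Int) :
    pvAltStep acc p maxdeg = pvTrunc (pvM acc p maxdeg).toNat
      (fun t => PowerSeries.coeff t (pvF acc * pvF p)) := by
  by_cases hm : 0 ≤ pvM acc p maxdeg
  · rw [pvAltStep, show pvM acc p maxdeg = (((pvM acc p maxdeg).toNat : Nat) : Int) from by omega,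
      PySem.List.pyRange_zero_natCast, List.map_map, pvTrunc]
    apply List.map_congr_left
    intro t _
    show _ = PowerSeries.coeff t (pvF acc * pvF p)
    rw [pvCoeff_mul_range]
    simp only [pvCoeff_F]
    exact pvCell acc p t
  · rw [pvAltStep, PySem.List.pyRange_one_eq_nil (by omega),
      show (pvM acc p maxdeg).toNat = 0 from by omega, pvTrunc]
    rfl

lemma pvM_le (acc p : List Int) (maxdeg : Int) : (pvM acc p maxdeg).toNat ≤ (maxdeg + 1).toNat := by
  rw [pvM]
  split_ifs <;> omega

lemma pvStep_coeff_zero (acc p : List Int) (maxdeg : Int) (t : Nat)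
    (h : (pvM acc p maxdeg).toNat ≤ t) (hn : t < (maxdeg + 1).toNat) :
    PowerSeries.coeff t (pvF acc * pvF p) = 0 := by
  rw [pvCoeff_mul_range]
  apply Finset.sum_eq_zero
  intro j hj
  simp only [pvCoeff_F]
  have hjt : j ≤ t := Nat.lt_succ_iff.mp (Finset.mem_range.mp hj)
  by_cases hp : p = []
  · subst hp
    simp [pvCo]
  · have hp1 : 1 ≤ p.length := List.length_pos_iff.mpr hp
    have hM : pvM acc p maxdeg = min (maxdeg + 1) ((acc.length : Int) + (p.length : Int) - 1) := by
      rw [pvM, if_neg hp]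
    have hsum : acc.length + p.length ≤ t + 1 := by omega
    by_cases hja : j < acc.length
    · rw [pvCo_eq_zero_of_le (l := p) (by omega), mul_zero]
    · rw [pvCo_eq_zero_of_le (l := acc) (by omega), zero_mul]

lemma pvEqnStep (acc p : List Int) (maxdeg : Int) :
    ∀ s < (maxdeg + 1).toNat,
      PowerSeries.coeff s (pvF (pvAltStep acc p maxdeg)) = PowerSeries.coeff s (pvF acc * pvF p) := by
  intro s hs
  rw [pvAltStep_spec, pvCoeff_F]
  by_cases hsM : s < (pvM acc p maxdeg).toNat
  · rw [pvCo_trunc _ _ hsM]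
  · rw [pvCo_eq_zero_of_le (by rw [pvTrunc_length]; omega)]
    exact (pvStep_coeff_zero acc p maxdeg s (by omega) hs).symm

lemma pvAlt_fold (maxdeg : Int) :
    ∀ (ps : List (List Int)) (acc : List Int), acc.length ≤ (maxdeg + 1).toNat →
      (ps.foldl (fun acc p => pvAltStep acc p maxdeg) acc).length ≤ (maxdeg + 1).toNat ∧
      (∀ t < (maxdeg + 1).toNat,
        pvCo (ps.foldl (fun acc p => pvAltStep acc p maxdeg) acc) t
          = PowerSeries.coeff t (pvF acc * pvProdF ps)) ∧
      (∀ t < (maxdeg + 1).toNat,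
        (ps.foldl (fun acc p => pvAltStep acc p maxdeg) acc).length ≤ t →
          PowerSeries.coeff t (pvF acc * pvProdF ps) = 0) := by
  intro ps
  induction ps with
  | nil =>
    intro acc hlen
    refine ⟨hlen, ?_, ?_⟩
    · intro t ht
      simp [pvProdF, pvCoeff_F]
    · intro t ht hle
      simp only [List.foldl_nil] at hle
      simp [pvProdF, pvCoeff_F]
      exact pvCo_eq_zero_of_le hle
  | cons p ps ih =>
    intro acc hlen
    have hstep_len : (pvAltStep acc p maxdeg).length ≤ (maxdeg + 1).toNat := by
      rw [pvAltStep_spec, pvTrunc_length]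
      exact pvM_le acc p maxdeg
    obtain ⟨h1, h2, h3⟩ := ih (pvAltStep acc p maxdeg) hstep_len
    have heq := pvEqnStep acc p maxdeg
    have hprod : pvProdF (p :: ps) = pvF p * pvProdF ps := by
      simp [pvProdF]
    refine ⟨by simpa using h1, ?_, ?_⟩
    · intro t ht
      rw [List.foldl_cons, h2 t ht,
        pvEqn_mul (ψ := pvProdF ps) (ψ' := pvProdF ps) heq (fun s _ => rfl) t ht,
        hprod, mul_assoc]
    · intro t ht hle
      rw [List.foldl_cons] at hle
      rw [hprod, ← mul_assoc,
        ← pvEqn_mul (ψ := pvProdF ps) (ψ' := pvProdF ps) heq (fun s _ => rfl) t ht]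
      exact h3 t ht hle

-- ========== A tree structure ==========

lemma pvPairUp_length (maxdeg : Int) : ∀ cur, (pvPairUp maxdeg cur).length = (cur.length + 1) / 2 := by
  intro cur
  induction cur using pvPairUp.induct with
  | case1 => simp [pvPairUp]
  | case2 a => simp [pvPairUp]
  | case3 a b rest ih => simp [pvPairUp, ih]; omega

lemma pvPad_length (maxdeg : Int) (hm : 0 ≤ maxdeg) (p : List Int) :
    (pvPad maxdeg p).length = (maxdeg + 1).toNat := by
  rw [pvPad]
  split_ifs with h
  · rw [PySem.List.slice_to _ (by omega : (0:Int) ≤ maxdeg + 1), List.length_take]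
    omega
  · rw [List.length_append, List.length_replicate]
    omega

lemma pvPad_co (maxdeg : Int) (p : List Int) (t : Nat) (ht : t < (maxdeg + 1).toNat) :
    pvCo (pvPad maxdeg p) t = pvCo p t := by
  rw [pvPad]
  split_ifs with h
  · rw [PySem.List.slice_to _ (by omega : (0:Int) ≤ maxdeg + 1)]
    simp [pvCo, List.getD_eq_getElem?_getD, ht]
  · by_cases hlt : t < p.length
    · simp [pvCo, List.getD_eq_getElem?_getD, List.getElem?_append, hlt]
    · have h1 : p[t]? = none := List.getElem?_eq_none (by omega)
      simp [pvCo, List.getD_eq_getElem?_getD, List.getElem?_append, hlt, List.getElem?_replicate]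
      split_ifs <;> rfl

lemma pvPairUp_all_length (maxdeg : Int) (hm : 0 ≤ maxdeg) :
    ∀ cur, (∀ l ∈ cur, l.length = (maxdeg + 1).toNat) →
      ∀ l ∈ pvPairUp maxdeg cur, l.length = (maxdeg + 1).toNat := by
  intro cur
  induction cur using pvPairUp.induct with
  | case1 => intro _ l hl; simp [pvPairUp] at hl
  | case2 a =>
    intro h l hl
    rw [pvPairUp] at hl
    rcases List.mem_singleton.mp hl with rfl
    rw [PySem.List.slice_to _ (by omega : (0:Int) ≤ maxdeg + 1), List.length_take,
      h a (by simp)]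
    omega
  | case3 a b rest ih =>
    intro h l hl
    rw [pvPairUp] at hl
    rcases List.mem_cons.mp hl with rfl | hl
    · exact pvConvolve_length a b maxdeg
    · exact ih (fun x hx => h x (by simp [hx])) l hl

lemma pvPairUp_coeff (maxdeg : Int) (hm : 0 ≤ maxdeg) :
    ∀ cur, (∀ l ∈ cur, l.length = (maxdeg + 1).toNat) →
      ∀ t < (maxdeg + 1).toNat,
        PowerSeries.coeff t (pvProdF (pvPairUp maxdeg cur)) = PowerSeries.coeff t (pvProdF cur) := by
  intro cur
  induction cur using pvPairUp.induct with
  | case1 => intro _ t ht; rfl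
  | case2 a =>
    intro h t ht
    have hs : PySem.List.slice a none (some (maxdeg + 1)) = a := by
      rw [PySem.List.slice_to _ (by omega : (0:Int) ≤ maxdeg + 1),
        show (maxdeg + 1).toNat = a.length from (h a (by simp)).symm]
      exact List.take_length ..
    rw [pvPairUp, hs]
  | case3 a b rest ih =>
    intro h t ht
    rw [pvPairUp]
    have h1 : ∀ s < (maxdeg + 1).toNat,
        PowerSeries.coeff s (pvF (pvConvolve a b maxdeg)) = PowerSeries.coeff s (pvF a * pvF b) := by
      intro s hs
      rw [pvConvolve_spec, pvCoeff_F, pvCo_trunc _ _ hs]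
    have h2 := ih (fun x hx => h x (by simp [hx]))
    have := pvEqn_mul h1 h2 t ht
    simp only [pvProdF, List.map_cons, List.prod_cons] at this ⊢
    rw [this, ← mul_assoc]

lemma pvLoop_sem (maxdeg : Int) (hm : 0 ≤ maxdeg) :
    ∀ (fuel : Nat) (cur : List (List Int)), cur.length ≤ fuel → cur ≠ [] →
      (∀ l ∈ cur, l.length = (maxdeg + 1).toNat) →
      ∃ r, pvLoop maxdeg fuel cur = [r] ∧ r.length = (maxdeg + 1).toNat ∧
        ∀ t < (maxdeg + 1).toNat, pvCo r t = PowerSeries.coeff t (pvProdF cur) := by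
  intro fuel
  induction fuel with
  | zero =>
    intro cur hle hne _
    exact absurd (List.eq_nil_of_length_eq_zero (by omega)) hne
  | succ fuel ih =>
    intro cur hle hne hlen
    rw [pvLoop]
    by_cases hl : cur.length > 1
    · rw [if_pos hl]
      have hplen := pvPairUp_length maxdeg cur
      obtain ⟨r, h1, h2, h3⟩ := ih (pvPairUp maxdeg cur) (by omega)
        (by
          intro hnil
          rw [hnil] at hplen
          simp at hplen
          omega)
        (pvPairUp_all_length maxdeg hm cur hlen)
      exact ⟨r, h1, h2, fun t ht => (h3 t ht).trans (pvPairUp_coeff maxdeg hm cur hlen t ht)⟩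
    · rw [if_neg hl]
      match cur, hne with
      | [r], _ =>
        refine ⟨r, rfl, hlen r (by simp), ?_⟩
        intro t ht
        simp [pvProdF, pvCoeff_F]
      | r :: s :: rest, _ => simp at hl

-- ========== the positive-degree equivalence ==========

lemma pvMain_nonneg (polys : List (List Int)) (maxdeg : Int) (hm : 0 ≤ maxdeg) :
    multiply_polys_tree polys maxdeg = multiply_polys_tree_alt polys maxdeg := by
  by_cases hp : polys = []
  · subst hp
    rfl
  · rw [multiply_polys_tree, if_neg hp, multiply_polys_tree_alt, if_neg hp]
    have hcur_len : ∀ l ∈ polys.map (pvPad maxdeg), l.length = (maxdeg + 1).toNat := by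
      intro l hl
      rcases List.mem_map.mp hl with ⟨p, _, rfl⟩
      exact pvPad_length maxdeg hm p
    have hcur_ne : polys.map (pvPad maxdeg) ≠ [] := by
      simpa [List.map_eq_nil_iff] using hp
    obtain ⟨r, hr1, hr2, hr3⟩ := pvLoop_sem maxdeg hm (polys.map (pvPad maxdeg)).length
      (polys.map (pvPad maxdeg)) le_rfl hcur_ne hcur_len
    show PySem.List.slice ((pvLoop maxdeg (List.map (pvPad maxdeg) polys).length
      (List.map (pvPad maxdeg) polys)).getD 0 []) none (some (maxdeg + 1)) = _
    rw [hr1, List.getD_cons_zero]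
    have hslice : PySem.List.slice r none (some (maxdeg + 1)) = r := by
      rw [PySem.List.slice_to _ (by omega : (0:Int) ≤ maxdeg + 1),
        show (maxdeg + 1).toNat = r.length from hr2.symm]
      exact List.take_length ..
    obtain ⟨hblen, hbco, hbzero⟩ := pvAlt_fold maxdeg polys [1] (by simp; omega)
    rw [hslice]
    have hmax : max (maxdeg + 1) 0 = (((maxdeg + 1).toNat : Nat) : Int) := by omega
    rw [hmax, PySem.List.slice_to_natCast]
    set L := polys.foldl (fun acc p => pvAltStep acc p maxdeg) [1] with hL
    set Z := List.replicate (maxdeg + 1 - (L.length : Int)).toNat (0 : Int) with hZ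
    have hlenL : (L ++ Z).length = (maxdeg + 1).toNat := by
      rw [List.length_append, hZ, List.length_replicate]
      omega
    rw [show List.take (maxdeg + 1).toNat (L ++ Z) = L ++ Z from by
      rw [← hlenL]; exact List.take_length ..]
    have hpad : ∀ p ∈ polys, ∀ s < (maxdeg + 1).toNat,
        PowerSeries.coeff s ((pvF ∘ pvPad maxdeg) p) = PowerSeries.coeff s (pvF p) := by
      intro p _ s hs
      show PowerSeries.coeff s (pvF (pvPad maxdeg p)) = _
      rw [pvCoeff_F, pvCoeff_F, pvPad_co maxdeg p s hs]
    have h1 : ∀ t < (maxdeg + 1).toNat,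
        PowerSeries.coeff t (pvProdF (polys.map (pvPad maxdeg)))
          = PowerSeries.coeff t (pvProdF polys) := by
      intro t ht
      rw [pvProdF, List.map_map]
      exact pvEqn_prod_map _ pvF polys hpad t ht
    have hone : ∀ s < (maxdeg + 1).toNat,
        PowerSeries.coeff s (pvF [1]) = PowerSeries.coeff s (1 : PowerSeries ℤ) := by
      intro s _
      rw [pvCoeff_F, PowerSeries.coeff_one]
      cases s with
      | zero => simp [pvCo]
      | succ s => simp [pvCo]
    have htot : ∀ t < (maxdeg + 1).toNat,
        PowerSeries.coeff t (pvF [1] * pvProdF polys) = PowerSeries.coeff t (pvProdF polys) := by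
      intro t ht
      rw [pvEqn_mul (ψ := pvProdF polys) (ψ' := pvProdF polys) hone (fun s _ => rfl) t ht, one_mul]
    have hA : r = pvTrunc (maxdeg + 1).toNat (fun t => PowerSeries.coeff t (pvProdF polys)) :=
      pvEq_trunc hr2 (fun t ht => by rw [hr3 t ht]; exact h1 t ht)
    have hB : L ++ Z = pvTrunc (maxdeg + 1).toNat (fun t => PowerSeries.coeff t (pvProdF polys)) := by
      refine pvEq_trunc hlenL ?_
      intro t ht
      by_cases hlt : t < L.length
      · have h4 : pvCo (L ++ Z) t = pvCo L t := by
          simp [pvCo, List.getD_eq_getElem?_getD, List.getElem?_append, hlt]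
        rw [h4, hbco t ht, htot t ht]
      · have h4 : pvCo (L ++ Z) t = 0 := by
          simp only [pvCo, List.getD_eq_getElem?_getD, List.getElem?_append, if_neg hlt, hZ,
            List.getElem?_replicate]
          split_ifs <;> rfl
        rw [h4, ← htot t ht]
        exact (hbzero t ht (by omega)).symm
    exact hA.trans hB.symm

-- ========== negative maxdeg ==========

lemma pvAlt_neg (maxdeg : Int) (hm : maxdeg < 0) (polys : List (List Int)) (hp : polys ≠ []) :
    multiply_polys_tree_alt polys maxdeg = [] := by
  rw [multiply_polys_tree_alt, if_neg hp]
  show PySem.List.slice _ none (some (max (maxdeg + 1) 0)) = []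
  rw [show max (maxdeg + 1) 0 = (((0 : Nat) : Nat) : Int) from by omega,
    PySem.List.slice_to_natCast]
  simp

lemma pvSlice_nil (z : Int) : PySem.List.slice ([] : List Int) none (some z) = [] := by
  by_cases hz : 0 ≤ z
  · rw [PySem.List.slice_to _ hz]
    simp
  · rw [show z = -(((-z).toNat : Nat) : Int) from by omega,
      PySem.List.slice_to_neg_natCast _ _ (by omega)]
    simp

lemma pvLoop_neg (maxdeg : Int) (hm : maxdeg < 0) :
    ∀ (fuel : Nat) (cur : List (List Int)), cur.length ≤ fuel → 2 ≤ cur.length →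
      pvLoop maxdeg fuel cur = [[]] := by
  have hsingle : ∀ (fuel : Nat) (cur : List (List Int)), cur.length ≤ 1 →
      pvLoop maxdeg fuel cur = cur := by
    intro fuel cur hc
    cases fuel with
    | zero => rfl
    | succ fuel => rw [pvLoop, if_neg (by omega)]
  have hconv : ∀ a b : List Int, pvConvolve a b maxdeg = [] := by
    intro a b
    exact List.eq_nil_of_length_eq_zero (by rw [pvConvolve_length]; omega)
  intro fuel
  induction fuel with
  | zero => intro cur hle h2; omega
  | succ fuel ih =>
    intro cur hle h2
    rw [pvLoop, if_pos (by omega)]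
    match cur, h2 with
    | a :: b :: rest, _ =>
      cases rest with
      | nil =>
        show pvLoop maxdeg fuel [pvConvolve a b maxdeg] = [[]]
        rw [hconv, hsingle fuel [[]] (by simp)]
      | cons c rest' =>
        have hplen := pvPairUp_length maxdeg (a :: b :: c :: rest')
        apply ih
        · simp at hle hplen ⊢
          omega
        · simp at hplen ⊢
          omega

lemma pvA_neg_single (maxdeg : Int) (hm : maxdeg < 0) (p : List Int)
    (hd : ¬ D_multiply_polys_tree [p] maxdeg) :
    multiply_polys_tree [p] maxdeg = [] := by
  rw [multiply_polys_tree, if_neg (by simp)]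
  have hsingle : pvLoop maxdeg [pvPad maxdeg p].length [pvPad maxdeg p] = [pvPad maxdeg p] := by
    rw [show [pvPad maxdeg p].length = 1 from rfl, pvLoop, if_neg (by simp)]
  show PySem.List.slice ((pvLoop maxdeg [pvPad maxdeg p].length [pvPad maxdeg p]).getD 0 [])
    none (some (maxdeg + 1)) = []
  rw [hsingle, List.getD_cons_zero]
  by_cases hm1 : maxdeg = -1
  · subst hm1
    rw [show (-1 : Int) + 1 = ((0 : Nat) : Int) from by omega, PySem.List.slice_to_natCast]
    simp
  · have hm2 : maxdeg ≤ -2 := by omega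
    have hlen : (p.length : Int) ≤ 2 * (-maxdeg - 1) := by
      by_contra hcon
      exact hd ⟨hm2, by simp, by simp only [List.getD_cons_zero]; omega⟩
    set k := (-(maxdeg + 1)).toNat with hkdef
    have hk : 0 < k := by omega
    have hz : maxdeg + 1 = -((k : Nat) : Int) := by omega
    have hpad : pvPad maxdeg p = p.take (p.length - k) := by
      rw [pvPad, if_pos (by omega), hz, PySem.List.slice_to_neg_natCast _ _ hk]
    rw [hpad, hz, PySem.List.slice_to_neg_natCast _ _ hk]
    have h0 : (p.take (p.length - k)).length - k = 0 := by
      rw [List.length_take]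
      omega
    rw [h0]
    simp

-- ===== VERDICT (by name: the statement is the Claim_ definition above) =====
theorem multiply_polys_tree_spec : Claim_unchanged_multiply_polys_tree := by
  intro polys maxdeg _hdom
  unfold Spec_multiply_polys_tree
  intro hd
  by_cases hm : 0 ≤ maxdeg
  · exact pvMain_nonneg polys maxdeg hm
  · match polys with
    | [] => rfl
    | [p] =>
      rw [pvA_neg_single maxdeg (by omega) p hd,
        pvAlt_neg maxdeg (by omega) [p] (by simp)]
    | p :: q :: rest =>
      rw [pvAlt_neg maxdeg (by omega) (p :: q :: rest) (by simp),
        multiply_polys_tree, if_neg (by simp)]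
      show PySem.List.slice ((pvLoop maxdeg ((p :: q :: rest).map (pvPad maxdeg)).length
        ((p :: q :: rest).map (pvPad maxdeg))).getD 0 []) none (some (maxdeg + 1)) = []
      rw [pvLoop_neg maxdeg (by omega) _ _ le_rfl (by simp), List.getD_cons_zero, pvSlice_nil]

theorem multiply_polys_tree_changed : Claim_changed_multiply_polys_tree := by
  unfold Claim_changed_multiply_polys_tree; decide

theorem multiply_polys_tree_tight : Claim_exact_multiply_polys_tree := by
  intro polys maxdeg _ hD heq
  obtain ⟨hm2, hlen1, hbig⟩ := hD
  match polys, hlen1 with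
  | [p], _ =>
    rw [pvAlt_neg maxdeg (by omega) [p] (by simp)] at heq
    have hbig' : 2 * (-(maxdeg + 1)).toNat < p.length := by
      simp only [List.getD_cons_zero] at hbig
      omega
    set k := (-(maxdeg + 1)).toNat with hkdef
    have hk : 0 < k := by omega
    have hz : maxdeg + 1 = -((k : Nat) : Int) := by omega
    have hA : multiply_polys_tree [p] maxdeg
        = (p.take (p.length - k)).take ((p.take (p.length - k)).length - k) := by
      rw [multiply_polys_tree, if_neg (by simp)]
      have hsingle : pvLoop maxdeg [pvPad maxdeg p].length [pvPad maxdeg p] = [pvPad maxdeg p] := by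
        rw [show [pvPad maxdeg p].length = 1 from rfl, pvLoop, if_neg (by simp)]
      show PySem.List.slice ((pvLoop maxdeg [pvPad maxdeg p].length [pvPad maxdeg p]).getD 0 [])
        none (some (maxdeg + 1)) = _
      rw [hsingle, List.getD_cons_zero]
      have hpad : pvPad maxdeg p = p.take (p.length - k) := by
        rw [pvPad, if_pos (by omega), hz, PySem.List.slice_to_neg_natCast _ _ hk]
      rw [hpad, hz, PySem.List.slice_to_neg_natCast _ _ hk]
    rw [hA] at heq
    have := congrArg List.length heq
    simp only [List.length_take, List.length_nil] at this
    omega
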